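-- pv_equiv track=rewrite | github.com/saness/VRPTW-meta | localsearch.py | get_routes_from_path
-- ===== SOURCE A (Python) =====
-- def get_routes_from_path(path):
--     """
--     Separates the path into individual routes, where each route starts and ends at the depot
--     :param path: Path
--     :return: a list of routes
--     """
--     routes = []
--     current_route = []
--     for node in path:
--         if node == 0:
--             if current_route:
--                 routes.append(current_route)
--                 current_route = []
--         else:
--             current_route.append(node)
--     if current_route:
--         routes.append(current_route)
--     return routes
-- ===== SOURCE B (Python) =====
-- from itertools import groupby
--
-- def get_routes_from_path(path):
--     return [list(g) for is_depot, g in groupby(path, key=lambda n: n == 0) if not is_depot]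
-- ===== Notes on version B (the rewrite author's own statement) =====
-- stated objective: idiomatic
-- what changed: Replaces the explicit current_route accumulator with its two conditional flushes by itertools.groupby over (n == 0), keeping only the non-zero runs.
import Mathlib
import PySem

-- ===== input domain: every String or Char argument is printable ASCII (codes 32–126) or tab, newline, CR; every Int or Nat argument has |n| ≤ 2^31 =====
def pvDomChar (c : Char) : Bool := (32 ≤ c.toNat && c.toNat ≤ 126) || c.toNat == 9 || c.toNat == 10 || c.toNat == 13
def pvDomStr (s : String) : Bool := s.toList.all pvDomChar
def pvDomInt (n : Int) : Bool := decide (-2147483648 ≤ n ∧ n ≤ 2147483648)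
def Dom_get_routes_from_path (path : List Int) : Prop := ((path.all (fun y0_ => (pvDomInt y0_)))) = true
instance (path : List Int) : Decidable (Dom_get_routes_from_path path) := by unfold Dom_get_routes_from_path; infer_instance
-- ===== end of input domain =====

-- B: itertools.groupby over (n == 0) keeping non-zero runs, instead of A's explicit accumulator with conditional flushes (idiomatic rewrite, same O(n) cost).
-- ===== PORT A =====
-- A's loop: state (routes, current_route); node == 0 flushes a nonempty current_route, otherwise append node.
def pvStepA (st : List (List Int) × List Int) (node : Int) : List (List Int) × List Int :=
  if node == 0 then
    (if st.2 ≠ [] then (st.1 ++ [st.2], []) else (st.1, []))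
  else (st.1, st.2 ++ [node])

def get_routes_from_path (path : List Int) : List (List Int) :=
  let st := path.foldl pvStepA ([], [])
  if st.2 ≠ [] then st.1 ++ [st.2] else st.1

-- ===== PORT B =====
-- groupby(path, key = n == 0): consecutive runs of equal key; keep the runs with key False (materialised lists).
def get_routes_from_path_alt : List Int → List (List Int)
  | [] => []
  | x :: xs =>
    if x == 0 then get_routes_from_path_alt xs
    else (x :: xs.takeWhile (fun n => !(n == 0))) :: get_routes_from_path_alt (xs.dropWhile (fun n => !(n == 0)))
  termination_by l => l.length
  decreasing_by
  · simp
  · simp; exact List.length_dropWhile_le _ _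

-- ===== PRECONDITION & SPEC =====
def Spec_get_routes_from_path (path : List Int) (out : List (List Int)) : Prop := out = get_routes_from_path_alt path
instance (path : List Int) (out : List (List Int)) : Decidable (Spec_get_routes_from_path path out) := by unfold Spec_get_routes_from_path; infer_instance

-- ===== CLAIM (what is proved, stated in full; the proofs are below) =====
def Claim_equal_get_routes_from_path : Prop := ∀ (path : List Int), Dom_get_routes_from_path path → Spec_get_routes_from_path path (get_routes_from_path path)

-- ===== LEMMAS AND PROOFS =====

-- ===== VERDICT (by name: the statement is the Claim_ definition above) =====
-- Invariant: A's remaining fold from state (routes, cur) finalises to routes ++ pvGlue cur l.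
def pvGlue (cur : List Int) (l : List Int) : List (List Int) :=
  if cur = [] then get_routes_from_path_alt l
  else (cur ++ l.takeWhile (fun n => !(n == 0))) :: get_routes_from_path_alt (l.dropWhile (fun n => !(n == 0)))

theorem pvFoldA (l : List Int) : ∀ (routes : List (List Int)) (cur : List Int),
    (let st := l.foldl pvStepA (routes, cur); if st.2 ≠ [] then st.1 ++ [st.2] else st.1)
      = routes ++ pvGlue cur l := by
  induction l with
  | nil =>
    intro routes cur
    simp [pvGlue, get_routes_from_path_alt]
    split_ifs with h <;> simp
  | cons x xs ih =>
    intro routes cur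
    by_cases hx : x = 0
    · subst hx
      simp only [List.foldl_cons, pvStepA]
      by_cases hc : cur = []
      · subst hc
        simpa [pvGlue, get_routes_from_path_alt] using ih routes []
      · have := ih (routes ++ [cur]) []
        simp [hc, pvGlue, get_routes_from_path_alt] at this ⊢
        simp [this]
    · simp only [List.foldl_cons, pvStepA]
      have := ih routes (cur ++ [x])
      simp only [pvGlue, List.takeWhile_cons, List.dropWhile_cons] at this ⊢
      by_cases hc : cur = [] <;>
        simp [hc, hx, get_routes_from_path_alt] at this ⊢ <;> simp [this]

theorem get_routes_from_path_spec : Claim_equal_get_routes_from_path := by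
  intro path _
  show get_routes_from_path path = get_routes_from_path_alt path
  have := pvFoldA path [] []
  simpa [get_routes_from_path, pvGlue] using this
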